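-- pv_equiv track=rewrite | github.com/xujesse1988-ship-it/dezhou_20260508 | tools/xvalidate_diverged_summary.py | winners_diff
-- ===== SOURCE A (Python) =====
-- def winners_diff(
--     ours: tuple[tuple[int, int], ...], ref: tuple[tuple[int, int], ...]
-- ) -> tuple[tuple[int, int], ...]:
--     out = []
--     for (s1, p1), (s2, p2) in zip(ours, ref):
--         if s1 != s2:
--             raise ValueError("seat ordering mismatch — payouts not aligned")
--         if p1 != p2:
--             out.append((s1, p1 - p2))
--     return tuple(out)
-- ===== SOURCE B (Python) =====
-- def winners_diff(ours, ref):
--     # Divide and conquer over the aligned prefix: split the index range at the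
--     # midpoint, solve each half recursively, concatenate the halves' results.
--     n = min(len(ours), len(ref))
--
--     def go(lo, hi):
--         if lo >= hi:
--             return ()
--         if hi - lo == 1:
--             (s1, p1), (s2, p2) = ours[lo], ref[lo]
--             if s1 != s2:
--                 raise ValueError("seat ordering mismatch — payouts not aligned")
--             return ((s1, p1 - p2),) if p1 != p2 else ()
--         mid = (lo + hi) // 2
--         return go(lo, mid) + go(mid, hi)
--
--     return go(0, n)
-- ===== Notes on version B (the rewrite author's own statement) =====
-- stated objective: alternative
-- what changed: A's single left-to-right zip loop with an append accumulator is replaced by a divide-and-conquer recursion that splits the aligned index range at the midpoint, solves each half, and concatenates the halves' results; correct because concatenation of diffs over adjacent ranges equals the diffs over the whole range.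
import Mathlib
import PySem

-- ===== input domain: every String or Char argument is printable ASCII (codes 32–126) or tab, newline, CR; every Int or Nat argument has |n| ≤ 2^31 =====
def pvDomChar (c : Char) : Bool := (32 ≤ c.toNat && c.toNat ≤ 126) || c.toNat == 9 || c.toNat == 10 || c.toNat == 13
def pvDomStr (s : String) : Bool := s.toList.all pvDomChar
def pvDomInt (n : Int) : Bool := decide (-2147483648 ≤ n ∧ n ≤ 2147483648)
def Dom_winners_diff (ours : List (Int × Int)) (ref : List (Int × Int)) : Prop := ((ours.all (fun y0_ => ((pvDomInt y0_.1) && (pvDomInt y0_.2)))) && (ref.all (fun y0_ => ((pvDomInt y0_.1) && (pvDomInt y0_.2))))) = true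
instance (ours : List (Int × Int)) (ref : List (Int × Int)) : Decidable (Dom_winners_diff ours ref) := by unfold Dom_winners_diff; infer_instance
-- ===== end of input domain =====

-- B replaces A's single left-to-right zip loop (append accumulator) by a
-- divide-and-conquer recursion over the aligned pairs: split the range at the
-- midpoint, solve each half, concatenate the results; objective: alternative.
-- Both A and B raise ValueError on misaligned seats; Pre_ excludes exactly those inputs.

-- ===== PORT A =====
-- A's loop: accumulate out; on seat mismatch the Python raises (modelled as none).
def winnersGoA : List ((Int × Int) × (Int × Int)) → List (Int × Int) → Option (List (Int × Int))
  | [], acc => some acc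
  | ((s1, p1), (s2, p2)) :: rest, acc =>
    if s1 ≠ s2 then none
    else if p1 ≠ p2 then winnersGoA rest (acc ++ [(s1, p1 - p2)])
    else winnersGoA rest acc

def winners_diff (ours : List (Int × Int)) (ref : List (Int × Int)) : List (Int × Int) :=
  (winnersGoA (ours.zip ref) []).getD []

-- ===== PORT B =====
-- B's go(lo, hi) over the zipped prefix, transcribed as divide-and-conquer on
-- the list of aligned pairs (take/drop at the midpoint); the raise is none.
def winnersGoB : List ((Int × Int) × (Int × Int)) → Option (List (Int × Int))
  | [] => some []
  | [((s1, p1), (s2, p2))] =>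
    if s1 ≠ s2 then none
    else if p1 ≠ p2 then some [(s1, p1 - p2)] else some []
  | x :: y :: rest =>
    let mid := (rest.length + 2) / 2
    match winnersGoB ((x :: y :: rest).take mid), winnersGoB ((x :: y :: rest).drop mid) with
    | some a, some b => some (a ++ b)
    | _, _ => none
termination_by l => l.length
decreasing_by
  all_goals (simp [List.length_take]; try omega)

def winners_diff_alt (ours : List (Int × Int)) (ref : List (Int × Int)) : List (Int × Int) :=
  (winnersGoB (ours.zip ref)).getD []  -- B raises ValueError in the none case (excluded by Pre_)

-- ===== PRECONDITION & SPEC =====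
-- A (and B) raise ValueError when some zipped pair has mismatched seats; Pre_ excludes exactly those.
def Pre_winners_diff (ours : List (Int × Int)) (ref : List (Int × Int)) : Prop :=
  ∀ p ∈ ours.zip ref, p.1.1 = p.2.1
instance (ours : List (Int × Int)) (ref : List (Int × Int)) : Decidable (Pre_winners_diff ours ref) := by unfold Pre_winners_diff; infer_instance

def pvWitness_winners_diff : (List (Int × Int)) × (List (Int × Int)) :=
  ([(1, 10), (2, -5), (3, 0)], [(1, 7), (2, -5)])

def Spec_winners_diff (ours : List (Int × Int)) (ref : List (Int × Int)) (out : List (Int × Int)) : Prop := out = winners_diff_alt ours ref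
instance (ours : List (Int × Int)) (ref : List (Int × Int)) (out : List (Int × Int)) : Decidable (Spec_winners_diff ours ref out) := by unfold Spec_winners_diff; infer_instance

-- ===== CLAIM (what is proved, stated in full; the proofs are below) =====
def Claim_equal_winners_diff : Prop := ∀ (ours : List (Int × Int)) (ref : List (Int × Int)), Dom_winners_diff ours ref → Pre_winners_diff ours ref → Spec_winners_diff ours ref (winners_diff ours ref)

-- ===== LEMMAS AND PROOFS =====

-- The per-pair diff both programs compute: nonzero payout differences.
def pvDiffF : (Int × Int) × (Int × Int) → Option (Int × Int) :=
  fun p => if p.1.2 ≠ p.2.2 then some (p.1.1, p.1.2 - p.2.2) else none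

theorem winnersGoA_aligned (l : List ((Int × Int) × (Int × Int)))
    (h : ∀ p ∈ l, p.1.1 = p.2.1) (acc : List (Int × Int)) :
    winnersGoA l acc = some (acc ++ l.filterMap pvDiffF) := by
  induction l generalizing acc with
  | nil => simp [winnersGoA]
  | cons hd tl ih =>
    obtain ⟨⟨s1, p1⟩, ⟨s2, p2⟩⟩ := hd
    have hs : s1 = s2 := h _ (List.mem_cons_self ..)
    have htl : ∀ p ∈ tl, p.1.1 = p.2.1 := fun p hp => h p (List.mem_cons_of_mem _ hp)
    by_cases hp : p1 ≠ p2
    · simp [winnersGoA, hs, hp, ih htl, ite_not, pvDiffF]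
    · simp [winnersGoA, hs, hp, ih htl, ite_not, pvDiffF]

theorem winnersGoB_aligned : ∀ (l : List ((Int × Int) × (Int × Int))),
    (∀ p ∈ l, p.1.1 = p.2.1) → winnersGoB l = some (l.filterMap pvDiffF) := by
  intro l
  induction hn : l.length using Nat.strong_induction_on generalizing l with
  | _ n ih =>
  intro h
  rcases l with _ | ⟨⟨⟨s1, p1⟩, ⟨s2, p2⟩⟩, _ | ⟨y, rest⟩⟩
  · simp [winnersGoB]
  · have hs : s1 = s2 := h _ (List.mem_cons_self ..)
    by_cases hp : p1 ≠ p2 <;> simp [winnersGoB, hs, hp, pvDiffF, ite_not]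
  · subst hn
    have h1 : ((((s1,p1),(s2,p2)) :: y :: rest).take ((rest.length + 2) / 2)).length
        < (((s1,p1),(s2,p2)) :: y :: rest).length := by
      simp [List.length_take]; omega
    have h2 : ((((s1,p1),(s2,p2)) :: y :: rest).drop ((rest.length + 2) / 2)).length
        < (((s1,p1),(s2,p2)) :: y :: rest).length := by
      simp
    rw [winnersGoB]
    rw [ih _ h1 _ rfl (fun p hp => h p (List.mem_of_mem_take hp)),
        ih _ h2 _ rfl (fun p hp => h p (List.mem_of_mem_drop hp))]
    simp [← List.filterMap_append]

-- ===== VERDICT (by name: the statement is the Claim_ definition above) =====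
theorem winners_diff_spec : Claim_equal_winners_diff := by
  intro ours ref _ hpre
  unfold Spec_winners_diff winners_diff winners_diff_alt
  rw [winnersGoA_aligned _ hpre, winnersGoB_aligned _ hpre]
  simp
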